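-- pv_equiv track=rewrite | github.com/StanleyTack/AOC2024 | day5/code.py | reorder_list_based_on_rules
-- ===== SOURCE A (Python) =====
-- def reorder_list_based_on_rules(original_list, ordered_rules):
--     # Extract items from the original list that are in the ordered rules
--     filtered_items = [item for item in original_list if item in ordered_rules]
--     # Sort those items according to the order specified in ordered_rules
--     filtered_items.sort(key=lambda x: ordered_rules.index(x))
--     # Reconstruct the list with new ordering for filtered items and original order for others
--     result = []
--     filtered_index = 0
--
--     for item in original_list:
--         if item in ordered_rules:
--             # Add the item from filtered list in the correct sorted order
--             result.append(filtered_items[filtered_index])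
--             filtered_index += 1
--         else:
--             # Add any item that is not in the rules, maintaining its original position
--             result.append(item)
--     return result
-- ===== SOURCE B (Python) =====
-- def reorder_list_based_on_rules(original_list, ordered_rules):
--     rule_set = set(ordered_rules)
--     # Count how many times each ruled value occurs in the original list.
--     counts = {}
--     for x in original_list:
--         if x in rule_set:
--             counts[x] = counts.get(x, 0) + 1
--     # Emit each distinct rule value (first-occurrence order) the counted
--     # number of times: this IS the ruled items in rule order, no sort needed.
--     replacement = []
--     for r in dict.fromkeys(ordered_rules):
--         replacement += [r] * counts.get(r, 0)
--     it = iter(replacement)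
--     return [next(it) if x in rule_set else x for x in original_list]
-- ===== Notes on version B (the rewrite author's own statement) =====
-- stated objective: faster
-- what changed: Replaces A's per-item 'in ordered_rules' scans plus a stable sort keyed by ordered_rules.index(x) (an O(n*m) key inside the sort) with a single counting pass over the list and one pass over the distinct rule values emitting each counted value in rule order, then a one-pass scatter.
import Mathlib
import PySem

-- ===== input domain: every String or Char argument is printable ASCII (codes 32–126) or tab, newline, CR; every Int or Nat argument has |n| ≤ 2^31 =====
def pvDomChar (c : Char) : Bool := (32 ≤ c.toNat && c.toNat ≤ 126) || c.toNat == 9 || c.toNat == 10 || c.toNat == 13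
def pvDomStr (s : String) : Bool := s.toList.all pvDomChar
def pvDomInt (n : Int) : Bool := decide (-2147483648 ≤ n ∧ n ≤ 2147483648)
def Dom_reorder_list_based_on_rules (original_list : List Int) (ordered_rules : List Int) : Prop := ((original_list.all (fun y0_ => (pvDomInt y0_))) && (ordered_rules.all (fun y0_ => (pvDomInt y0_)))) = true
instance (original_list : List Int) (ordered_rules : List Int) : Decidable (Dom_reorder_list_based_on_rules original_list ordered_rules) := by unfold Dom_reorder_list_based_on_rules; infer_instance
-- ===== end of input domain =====

-- B replaces A's stable sort by ordered_rules.index (an O(n·m) key inside an O(n log n)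
-- sort) with a counting pass: count ruled items once, emit each distinct rule value
-- count-many times in rule order, then scatter back in one pass. Objective: faster.

-- ===== PORT A =====
def reorder_list_based_on_rules (original_list : List Int) (ordered_rules : List Int) : List Int :=
  let filtered_items := original_list.filter (fun item => ordered_rules.contains item)
  -- key = ordered_rules.index(x); every sorted item is in ordered_rules, so index? is some (getD 0 unreachable)
  let sorted_items := PySem.List.sorted filtered_items (fun x => (PySem.List.index? ordered_rules x).getD 0)
  (original_list.foldl
    (fun (st : List Int × Nat) item =>
      if ordered_rules.contains item then
        -- filtered_items[filtered_index] is always in range, so pyGet? is some (getD 0 unreachable)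
        (st.1 ++ [(PySem.List.pyGet? sorted_items (st.2 : Int)).getD 0], st.2 + 1)
      else (st.1 ++ [item], st.2))
    ([], 0)).1

-- ===== PORT B =====
def reorder_list_based_on_rules_alt (original_list : List Int) (ordered_rules : List Int) : List Int :=
  let rule_set : PySem.Set Int := PySem.Set.ofList ordered_rules
  let counts : PySem.Dict Int Int := original_list.foldl
    (fun d x => if PySem.Set.contains rule_set x then d.insert x (d.getD x 0 + 1) else d) PySem.Dict.empty
  let replacement : List Int := (PySem.List.dedup ordered_rules).foldl
    (fun acc r => acc ++ List.replicate (counts.getD r 0).toNat r) []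
  -- next(it) always succeeds where it is taken, so headD 0 is unreachable
  (original_list.foldl
    (fun (st : List Int × List Int) x =>
      if PySem.Set.contains rule_set x then (st.1 ++ [st.2.headD 0], st.2.tail)
      else (st.1 ++ [x], st.2))
    ([], replacement)).1

-- ===== PRECONDITION & SPEC =====
def Spec_reorder_list_based_on_rules (original_list : List Int) (ordered_rules : List Int) (out : List Int) : Prop := out = reorder_list_based_on_rules_alt original_list ordered_rules
instance (original_list : List Int) (ordered_rules : List Int) (out : List Int) : Decidable (Spec_reorder_list_based_on_rules original_list ordered_rules out) := by unfold Spec_reorder_list_based_on_rules; infer_instance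

-- ===== CLAIM (what is proved, stated in full; the proofs are below) =====
def Claim_equal_reorder_list_based_on_rules : Prop := ∀ (original_list : List Int) (ordered_rules : List Int), Dom_reorder_list_based_on_rules original_list ordered_rules → Spec_reorder_list_based_on_rules original_list ordered_rules (reorder_list_based_on_rules original_list ordered_rules)

-- ===== LEMMAS AND PROOFS =====

-- counting a value in the block decomposition
theorem pvCountFlatMapReplicate (g : Int → Nat) (v : Int) :
    ∀ (ds : List Int), ds.Nodup →
      (ds.flatMap (fun r => List.replicate (g r) r)).count v = if v ∈ ds then g v else 0 := by
  intro ds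
  induction ds with
  | nil => intro _; simp
  | cons d ds ih =>
    intro hnd
    rcases List.nodup_cons.mp hnd with ⟨hd, hnd'⟩
    by_cases hv : v = d
    · subst hv
      simp [List.count_append, ih hnd', hd]
    · simp [List.count_append, List.count_replicate, ih hnd', hv, Ne.symm hv]

-- the distinct rule values, in first-occurrence order, have nondecreasing first index
theorem pvPairwiseKeyOfList :
    ∀ (rules : List Int),
      (PySem.Set.ofList rules).Pairwise
        (fun a b => (PySem.List.index? rules a).getD 0 ≤ (PySem.List.index? rules b).getD 0) := by
  intro rules
  induction rules with
  | nil => simp [PySem.Set.ofList_nil]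
  | cons r rest ih =>
    rw [PySem.Set.ofList_cons]
    refine List.pairwise_cons.mpr ⟨?_, ?_⟩
    · intro b _hb
      rw [PySem.List.index?_cons_self]
      simp
    · have hsub : ((PySem.Set.ofList rest).discard r).Sublist (PySem.Set.ofList rest) := by
        unfold PySem.Set.discard
        exact List.filter_sublist
      have hpw := List.Pairwise.sublist hsub ih
      refine hpw.imp_of_mem ?_
      intro a b ha hb hab
      have ha' := (PySem.Set.mem_discard _ _ _).mp ha
      have hb' := (PySem.Set.mem_discard _ _ _).mp hb
      have hma : a ∈ rest := (PySem.Set.mem_ofList rest a).mp ha'.1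
      have hmb : b ∈ rest := (PySem.Set.mem_ofList rest b).mp hb'.1
      obtain ⟨ka, hka⟩ := Option.isSome_iff_exists.mp ((PySem.List.index?_isSome_iff rest a).mpr hma)
      obtain ⟨kb, hkb⟩ := Option.isSome_iff_exists.mp ((PySem.List.index?_isSome_iff rest b).mpr hmb)
      rw [PySem.List.index?_cons_of_ne rest (Ne.symm ha'.2),
          PySem.List.index?_cons_of_ne rest (Ne.symm hb'.2), hka, hkb]
      rw [hka, hkb] at hab
      simpa using Nat.add_le_add_right (by simpa using hab) 1

-- blocks of equal elements inherit pairwise order of the block values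
theorem pvPairwiseKeyFlatMap (k : Int → Nat) (g : Int → Nat) :
    ∀ (ds : List Int), ds.Pairwise (fun a b => k a ≤ k b) →
      (ds.flatMap (fun r => List.replicate (g r) r)).Pairwise (fun a b => k a ≤ k b) := by
  intro ds
  induction ds with
  | nil => intro _; simp
  | cons d ds ih =>
    intro hpw
    rcases List.pairwise_cons.mp hpw with ⟨hd, hpw'⟩
    rw [List.flatMap_cons]
    refine List.pairwise_append.mpr ⟨?_, ih hpw', ?_⟩
    · refine List.pairwise_iff_forall_sublist.mpr ?_
      intro a b hs
      have ha : a ∈ List.replicate (g d) d := hs.subset (by simp)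
      have hb : b ∈ List.replicate (g d) d := hs.subset (by simp)
      rw [(List.mem_replicate.mp ha).2, (List.mem_replicate.mp hb).2]
    · intro a ha b hb
      rw [(List.mem_replicate.mp ha).2]
      obtain ⟨c, hc, hbc⟩ := List.mem_flatMap.mp hb
      rw [(List.mem_replicate.mp hbc).2]
      exact hd c hc

-- an element of rules is recovered from its first index
theorem pvKeyRecover (rules : List Int) (x : Int) (hx : x ∈ rules) :
    (rules[(PySem.List.index? rules x).getD 0]?).getD 0 = x := by
  obtain ⟨k, hk⟩ := Option.isSome_iff_exists.mp ((PySem.List.index?_isSome_iff rules x).mpr hx)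
  obtain ⟨hlt, hget, -⟩ := PySem.List.getElem_of_index?_eq_some hk
  rw [hk]
  simp [List.getElem?_eq_getElem hlt, hget]

-- two key-sorted lists over rules that are permutations of each other are equal
theorem pvEqOfPermOfPairwise (rules : List Int) (l₁ l₂ : List Int)
    (h₁ : ∀ x ∈ l₁, x ∈ rules) (h₂ : ∀ x ∈ l₂, x ∈ rules)
    (hperm : l₁.Perm l₂)
    (hp₁ : l₁.Pairwise (fun a b => (PySem.List.index? rules a).getD 0 ≤ (PySem.List.index? rules b).getD 0))
    (hp₂ : l₂.Pairwise (fun a b => (PySem.List.index? rules a).getD 0 ≤ (PySem.List.index? rules b).getD 0)) :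
    l₁ = l₂ := by
  set key : Int → Nat := fun x => (PySem.List.index? rules x).getD 0 with hkey
  have hmap : l₁.map key = l₂.map key := by
    refine PySem.List.eq_of_perm_of_pairwise_le_of_injective (fun n : Nat => n)
      Function.injective_id (hperm.map key) ?_ ?_
    · exact (List.pairwise_map).mpr hp₁
    · exact (List.pairwise_map).mpr hp₂
  have recover : ∀ (l : List Int), (∀ x ∈ l, x ∈ rules) →
      (l.map key).map (fun i => (rules[i]?).getD 0) = l := by
    intro l hl
    rw [List.map_map]
    calc l.map ((fun i => (rules[i]?).getD 0) ∘ key)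
        = l.map id := List.map_congr_left (fun a ha => pvKeyRecover rules a (hl a ha))
      _ = l := List.map_id l
  calc l₁ = (l₁.map key).map (fun i => (rules[i]?).getD 0) := (recover l₁ h₁).symm
    _ = (l₂.map key).map (fun i => (rules[i]?).getD 0) := by rw [hmap]
    _ = l₂ := recover l₂ h₂

-- A's stably sorted ruled items = B's count-blocks in rule order
theorem pvSortedEqBlocks (rules f : List Int) (hf : ∀ x ∈ f, x ∈ rules) :
    PySem.List.sorted f (fun x => (PySem.List.index? rules x).getD 0) =
      (PySem.List.dedup rules).flatMap (fun r => List.replicate (f.count r) r) := by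
  set key : Int → Nat := fun x => (PySem.List.index? rules x).getD 0 with hkey
  have hnd : (PySem.List.dedup rules).Nodup := by
    rw [PySem.List.dedup_eq_ofList]; exact PySem.Set.nodup_ofList rules
  have hm1 : ∀ x ∈ PySem.List.sorted f key, x ∈ rules := by
    intro x hx; exact hf x ((PySem.List.mem_sorted f key false x).mp hx)
  have hm2 : ∀ x ∈ (PySem.List.dedup rules).flatMap (fun r => List.replicate (f.count r) r),
      x ∈ rules := by
    intro x hx
    obtain ⟨r, hr, hxr⟩ := List.mem_flatMap.mp hx
    rw [(List.mem_replicate.mp hxr).2]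
    rw [PySem.List.dedup_eq_ofList] at hr
    exact (PySem.Set.mem_ofList rules r).mp hr
  have hpermR : ((PySem.List.dedup rules).flatMap (fun r => List.replicate (f.count r) r)).Perm f := by
    refine List.perm_iff_count.mpr ?_
    intro v
    rw [pvCountFlatMapReplicate (fun r => f.count r) v _ hnd]
    by_cases hv : v ∈ PySem.List.dedup rules
    · rw [if_pos hv]
    · have hvr : v ∉ rules := by
        intro hmem
        exact hv (by rw [PySem.List.dedup_eq_ofList]; exact (PySem.Set.mem_ofList rules v).mpr hmem)
      have : v ∉ f := fun hvf => hvr (hf v hvf)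
      rw [if_neg hv, List.count_eq_zero.mpr this]
  refine pvEqOfPermOfPairwise rules _ _ hm1 hm2 ((PySem.List.sorted_perm f key false).trans hpermR.symm)
    (PySem.List.sorted_pairwise f key) ?_
  refine pvPairwiseKeyFlatMap key (fun r => f.count r) _ ?_
  rw [PySem.List.dedup_eq_ofList]
  exact pvPairwiseKeyOfList rules

-- A's indexed scatter = B's consuming scatter
theorem pvScatterEq (q : Int → Bool) (S : List Int) :
    ∀ (l : List Int) (acc : List Int) (i : Nat),
      (l.foldl
        (fun (st : List Int × Nat) x =>
          if q x then (st.1 ++ [(PySem.List.pyGet? S (st.2 : Int)).getD 0], st.2 + 1)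
          else (st.1 ++ [x], st.2)) (acc, i)).1
      = (l.foldl
          (fun (st : List Int × List Int) x =>
            if q x then (st.1 ++ [st.2.headD 0], st.2.tail)
            else (st.1 ++ [x], st.2)) (acc, S.drop i)).1 := by
  intro l
  induction l with
  | nil => intro acc i; rfl
  | cons x l ih =>
    intro acc i
    simp only [List.foldl_cons]
    by_cases hq : q x
    · simp only [hq, if_true]
      have hhd : (PySem.List.pyGet? S (i : Int)).getD 0 = (S.drop i).headD 0 := by
        rw [PySem.List.pyGet?_natCast, List.headD_eq_head?, List.head?_drop]
      rw [hhd, List.tail_drop]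
      exact ih (acc ++ [(S.drop i).headD 0]) (i + 1)
    · simp only [hq, if_false, Bool.false_eq_true]
      exact ih (acc ++ [x]) i

-- ===== VERDICT (by name: the statement is the Claim_ definition above) =====
theorem reorder_list_based_on_rules_spec : Claim_equal_reorder_list_based_on_rules := by
  intro l rules _hdom
  simp only [Spec_reorder_list_based_on_rules, reorder_list_based_on_rules,
    reorder_list_based_on_rules_alt]
  have hq : ∀ x : Int, PySem.Set.contains (PySem.Set.ofList rules) x = rules.contains x := by
    intro x
    rw [Bool.eq_iff_iff]
    constructor
    · intro hc
      have hx := (PySem.Set.mem_ofList rules x).mp ((PySem.Set.contains_iff (PySem.Set.ofList rules) x).mp hc)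
      simpa using hx
    · intro hc
      exact (PySem.Set.contains_iff (PySem.Set.ofList rules) x).mpr
        ((PySem.Set.mem_ofList rules x).mpr (by simpa using hc))
  simp only [hq]
  set f := l.filter (fun item => rules.contains item) with hf
  have hcounts : ∀ r : Int,
      ((l.foldl (fun (d : PySem.Dict Int Int) x => if rules.contains x then d.insert x (d.getD x 0 + 1) else d)
        PySem.Dict.empty).getD r 0) = (f.count r : Int) := by
    intro r
    rw [← List.foldl_filter (p := fun x => rules.contains x)
      (f := fun (d : PySem.Dict Int Int) x => d.insert x (d.getD x 0 + 1)), ← hf]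
    rw [PySem.Dict.getD_foldl_insert_add_one]
    simp [PySem.Dict.getD_empty]
  have hrep : (PySem.List.dedup rules).foldl
      (fun acc r => acc ++ List.replicate
        (((l.foldl (fun (d : PySem.Dict Int Int) x => if rules.contains x then d.insert x (d.getD x 0 + 1) else d)
          PySem.Dict.empty).getD r 0).toNat) r) []
      = (PySem.List.dedup rules).flatMap (fun r => List.replicate (f.count r) r) := by
    rw [PySem.List.foldl_append_eq_flatMap]
    simp only [List.nil_append]
    congr 1
    funext r
    rw [hcounts r]
    simp
  rw [hrep]
  have hsorted : PySem.List.sorted f (fun x => (PySem.List.index? rules x).getD 0) =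
      (PySem.List.dedup rules).flatMap (fun r => List.replicate (f.count r) r) := by
    refine pvSortedEqBlocks rules f ?_
    intro x hx
    have := List.of_mem_filter hx
    simpa using this
  rw [hsorted]
  simpa using pvScatterEq (fun x => rules.contains x)
    ((PySem.List.dedup rules).flatMap (fun r => List.replicate (f.count r) r)) l [] 0
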